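-- pv_equiv track=rewrite | github.com/alexandraback/datacollection | solutions_5753053697277952_1/Python/Matthew23/a.py | tree1
-- ===== SOURCE A (Python) =====
-- def tree1(l):
--     zero, one = 0, 0
--     for x in l:
--         if x == 0:
--             zero += 1
--         elif x == 1:
--             one += 1
--     return one == 3 and zero + one == len(l)
-- ===== SOURCE B (Python) =====
-- def tree1(l):
--     return [x for x in l if x != 0] == [1, 1, 1]
-- ===== Notes on version B (the rewrite author's own statement) =====
-- stated objective: simpler
-- what changed: Instead of A's loop maintaining zero/one counters and comparing counts to the length, B filters out the zeros and tests whether the remaining sublist is literally [1, 1, 1]; no counters or length arithmetic remain.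
import Mathlib
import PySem

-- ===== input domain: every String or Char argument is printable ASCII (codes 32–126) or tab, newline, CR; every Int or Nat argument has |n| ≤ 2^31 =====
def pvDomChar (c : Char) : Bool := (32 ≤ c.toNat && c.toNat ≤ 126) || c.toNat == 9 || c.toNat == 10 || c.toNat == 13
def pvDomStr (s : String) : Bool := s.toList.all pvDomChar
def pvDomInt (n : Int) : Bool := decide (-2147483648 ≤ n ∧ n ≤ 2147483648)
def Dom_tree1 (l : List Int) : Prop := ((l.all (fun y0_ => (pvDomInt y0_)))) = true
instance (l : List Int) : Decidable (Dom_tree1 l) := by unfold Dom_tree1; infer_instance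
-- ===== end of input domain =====

-- B replaces A's counter loop and length arithmetic by filtering out the zeros
-- and comparing the remainder to the literal [1, 1, 1]: simpler, same O(n) cost.

-- ===== PORT A =====
-- A: one loop maintaining (zero, one); then 'one == 3 and zero + one == len(l)'.
def tree1 (l : List Int) : Bool :=
  let zo := l.foldl
    (fun (zo : Int × Int) x =>
      if x == 0 then (zo.1 + 1, zo.2)
      else if x == 1 then (zo.1, zo.2 + 1)
      else zo) (0, 0)
  decide (zo.2 = 3 ∧ zo.1 + zo.2 = (l.length : Int))

-- ===== PORT B =====
-- B: '[x for x in l if x != 0] == [1, 1, 1]'.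
def tree1_alt (l : List Int) : Bool :=
  decide (l.filter (fun x => !(x == 0)) = [1, 1, 1])

-- ===== PRECONDITION & SPEC =====
def Spec_tree1 (l : List Int) (out : Bool) : Prop := out = tree1_alt l
instance (l : List Int) (out : Bool) : Decidable (Spec_tree1 l out) := by unfold Spec_tree1; infer_instance

-- ===== CLAIM (what is proved, stated in full; the proofs are below) =====
def Claim_equal_tree1 : Prop := ∀ (l : List Int), Dom_tree1 l → Spec_tree1 l (tree1 l)

-- ===== LEMMAS AND PROOFS =====

-- A's fold computes (z + #zeros, o + #ones).
theorem treeA_fold (l : List Int) (z o : Int) :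
    l.foldl
      (fun (zo : Int × Int) x =>
        if x == 0 then (zo.1 + 1, zo.2)
        else if x == 1 then (zo.1, zo.2 + 1)
        else zo) (z, o)
    = (z + (l.countP (fun x => x == 0) : Int), o + (l.countP (fun x => x == 1) : Int)) := by
  induction l generalizing z o with
  | nil => simp
  | cons x xs ih =>
    simp only [List.foldl_cons, List.countP_cons]
    by_cases h0 : x = 0
    · subst h0
      rw [if_pos (by decide), ih]
      simp [Prod.ext_iff]
      omega
    · by_cases h1 : x = 1
      · subst h1
        rw [if_neg (by decide), if_pos (by decide), ih]
        simp [Prod.ext_iff]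
        omega
      · rw [if_neg (by simp [h0]), if_neg (by simp [h1]), ih]
        simp [h0, h1]

-- The two counts never exceed the length (no x is both 0 and 1).
theorem count_le (l : List Int) :
    l.countP (fun x => x == 0) + l.countP (fun x => x == 1) ≤ l.length := by
  induction l with
  | nil => simp
  | cons x xs ih =>
    by_cases h0 : x = 0
    · subst h0; simp; omega
    · by_cases h1 : x = 1
      · subst h1; simp; omega
      · simp [h0, h1]; omega

-- A's counting condition, generalized to n ones, says exactly that the
-- zero-filtered list is n copies of 1.
theorem count_iff_replicate (l : List Int) (n : ℕ) :
    (l.countP (fun x => x == 1) = n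
      ∧ l.countP (fun x => x == 0) + l.countP (fun x => x == 1) = l.length)
    ↔ l.filter (fun x => !(x == 0)) = List.replicate n 1 := by
  induction l generalizing n with
  | nil =>
    constructor
    · rintro ⟨h, _⟩; subst h; simp
    · intro h
      have hn : n = 0 := by
        cases n with
        | zero => rfl
        | succ m => rw [List.replicate_succ] at h; exact absurd h (by simp)
      subst hn; simp
  | cons x xs ih =>
    by_cases h0 : x = 0
    · subst h0
      simp only [List.countP_cons, List.filter_cons, List.length_cons]
      norm_num
      rw [← ih n]
      constructor
      · rintro ⟨a, b⟩; exact ⟨a, by omega⟩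
      · rintro ⟨a, b⟩; exact ⟨a, by omega⟩
    · by_cases h1 : x = 1
      · subst h1
        simp only [List.countP_cons, List.filter_cons, List.length_cons]
        norm_num
        cases n with
        | zero =>
          constructor
          · rintro ⟨a, _⟩; omega
          · intro h; exact absurd h (by simp)
        | succ m =>
          rw [List.replicate_succ, List.cons_eq_cons]
          constructor
          · rintro ⟨a, b⟩; exact ⟨rfl, (ih m).mp ⟨by omega, by omega⟩⟩
          · rintro ⟨_, h⟩; obtain ⟨a, b⟩ := (ih m).mpr h; exact ⟨by omega, by omega⟩
      · simp only [List.countP_cons, List.filter_cons, List.length_cons]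
        simp [h0, h1]
        constructor
        · rintro ⟨a, b⟩
          have := count_le xs
          omega
        · intro h
          have hx : x ∈ List.replicate n (1 : Int) := h ▸ List.mem_cons_self ..
          exact absurd (List.eq_of_mem_replicate hx) h1

-- ===== VERDICT =====
theorem tree1_spec : Claim_equal_tree1 := by
  intro l _
  show tree1 l = tree1_alt l
  unfold tree1 tree1_alt
  simp only [treeA_fold, zero_add]
  rw [decide_eq_decide]
  have h := count_iff_replicate l 3
  simp only [show List.replicate 3 (1 : Int) = [1, 1, 1] from rfl] at h
  rw [← h]
  constructor
  · rintro ⟨a, b⟩; exact ⟨by exact_mod_cast a, by omega⟩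
  · rintro ⟨a, b⟩; exact ⟨by exact_mod_cast a, by omega⟩
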